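-- pv_equiv track=rewrite | github.com/myvu0405/Python-assignments | lists.py | countLettersInStr
-- ===== SOURCE A (Python) =====
-- def countLettersInStr(subStr, str):
--     result=[]
--     count=0
--     mainStr = str
--     idx= mainStr.find(subStr)
--     while  idx> -1:
--         result.extend(mainStr[0:idx])
--         if count==0:
--             result.extend([subStr])
--         count +=1
--         mainStr=mainStr.replace(mainStr[0:len(subStr)+idx],'',1) #fix: only remove once
--         idx=mainStr.find(subStr)
--
--     result.extend(mainStr)
--     replaceStr= ''.join(result)
--
--     return replaceStr, count
-- ===== SOURCE B (Python) =====
-- def countLettersInStr(subStr, str):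
--     parts = str.split(subStr)
--     count = len(parts) - 1
--     if count == 0:
--         return str, 0
--     return parts[0] + subStr + ''.join(parts[1:]), count
-- ===== Notes on version B (the rewrite author's own statement) =====
-- stated objective: simpler
-- what changed: A's while loop that repeatedly finds the next occurrence and chops it off with str.replace(...,'',1) is replaced by a single str.split(subStr) followed by recombining parts[0] + subStr + ''.join(parts[1:]).
import Mathlib
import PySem

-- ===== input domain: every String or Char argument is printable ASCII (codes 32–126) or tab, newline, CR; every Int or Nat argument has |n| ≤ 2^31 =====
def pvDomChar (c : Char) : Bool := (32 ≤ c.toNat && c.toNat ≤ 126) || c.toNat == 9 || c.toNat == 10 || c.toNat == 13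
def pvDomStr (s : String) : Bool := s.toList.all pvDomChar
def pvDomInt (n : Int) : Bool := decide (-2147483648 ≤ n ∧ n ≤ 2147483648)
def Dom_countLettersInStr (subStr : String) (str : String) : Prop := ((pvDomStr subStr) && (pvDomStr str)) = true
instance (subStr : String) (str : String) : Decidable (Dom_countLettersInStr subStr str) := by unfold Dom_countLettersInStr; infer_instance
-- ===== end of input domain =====

-- B replaces A's find/replace chopping loop by a single split-and-recombine; objective: simpler (same result, no loop).

-- ===== PORT A =====
-- hand port of Python's mainStr.replace(pat, '', 1) (PySem has no count-limited replace):
-- remove the FIRST occurrence of pat; exact, including pat = '' (Python then inserts '' at the front, i.e. identity).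
def pvReplace1 (s : List Char) (pat : List Char) : List Char :=
  if PySem.Chars.find s pat = -1 then s
  else s.take (PySem.Chars.find s pat).toNat ++ s.drop ((PySem.Chars.find s pat).toNat + pat.length)

-- A's while loop; fuel bounds the iteration count (str shrinks by ≥ 1 per round when subStr ≠ '';
-- on subStr = '' the Python loop never terminates — excluded by Pre_).
def pvALoop (sub : List Char) : Nat → List Char → List Char → Nat → List Char × Nat
  | fuel, mainStr, result, count =>
    if PySem.Chars.find mainStr sub > -1 then
      match fuel with
      | 0 => (result ++ mainStr, count)  -- fuel exhausted (unreachable under Pre_)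
      | fuel' + 1 =>
        pvALoop sub fuel'
          -- mainStr = mainStr.replace(mainStr[0:len(subStr)+idx], '', 1)
          (pvReplace1 mainStr
            (PySem.List.slice mainStr (some 0) (some ((sub.length : Int) + PySem.Chars.find mainStr sub))))
          -- result.extend(mainStr[0:idx]); if count == 0: result.extend([subStr])
          ((result ++ PySem.List.slice mainStr (some 0) (some (PySem.Chars.find mainStr sub))) ++
            (if count = 0 then sub else []))
          (count + 1)
    else (result ++ mainStr, count)

def countLettersInStr (subStr : String) (str : String) : String × Int :=
  let r := pvALoop subStr.toList (str.toList.length + 1) str.toList [] 0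
  (String.ofList r.1, (r.2 : Int))

-- ===== PORT B =====
def countLettersInStr_alt (subStr : String) (str : String) : String × Int :=
  match PySem.Chars.split? str.toList subStr.toList with
  | none => (str, 0)  -- Python B raises ValueError here (subStr = ''); excluded by Pre_
  | some parts =>
    let count : Int := (parts.length : Int) - 1
    if count = 0 then (str, 0)
    else (String.ofList (parts.headD [] ++ subStr.toList ++ PySem.Chars.join [] (parts.drop 1)), count)

-- ===== PRECONDITION & SPEC =====
-- Pre_ excludes subStr = '', on which A's while loop never terminates (and B's str.split raises ValueError).
def Pre_countLettersInStr (subStr : String) (str : String) : Prop := subStr ≠ ""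
instance (subStr : String) (str : String) : Decidable (Pre_countLettersInStr subStr str) := by unfold Pre_countLettersInStr; infer_instance
def pvWitness_countLettersInStr : String × String := ("an", "banana")

def Spec_countLettersInStr (subStr : String) (str : String) (out : String × Int) : Prop := out = countLettersInStr_alt subStr str
instance (subStr : String) (str : String) (out : String × Int) : Decidable (Spec_countLettersInStr subStr str out) := by unfold Spec_countLettersInStr; infer_instance

-- ===== CLAIM (what is proved, stated in full; the proofs are below) =====
def Claim_equal_countLettersInStr : Prop := ∀ (subStr : String) (str : String), Dom_countLettersInStr subStr str → Pre_countLettersInStr subStr str → Spec_countLettersInStr subStr str (countLettersInStr subStr str)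


-- reference chopper: pvChop sep s = Python s.split(sep) for sep ≠ []
theorem pvChop_dec (sep s : List Char) (h : ¬(PySem.Chars.find s sep = -1 ∨ sep = [])) :
    (s.drop ((PySem.Chars.find s sep).toNat + sep.length)).length < s.length := by
  rw [not_or] at h
  obtain ⟨h1, h2⟩ := h
  have hnn : 0 ≤ PySem.Chars.find s sep := by
    have := PySem.Chars.neg_one_le_find s sep; omega
  obtain ⟨hp, -⟩ := PySem.Chars.find_spec hnn
  have hle := hp.length_le
  have hl : 1 ≤ sep.length := List.length_pos_iff.mpr h2
  simp [List.length_drop] at hle ⊢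
  omega

def pvChop (sep : List Char) (s : List Char) : List (List Char) :=
  if h : PySem.Chars.find s sep = -1 ∨ sep = [] then [s]
  else
    s.take (PySem.Chars.find s sep).toNat ::
      pvChop sep (s.drop ((PySem.Chars.find s sep).toNat + sep.length))
  termination_by s.length
  decreasing_by exact pvChop_dec sep s h

-- ===== LEMMAS AND PROOFS =====

theorem pvFind_unique (s sub : List Char) (n : Nat)
    (h1 : sub <+: s.drop n) (h2 : ∀ i < n, ¬ sub <+: s.drop i) :
    PySem.Chars.find s sub = (n : Int) := by
  have hin : PySem.Chars.isIn sub s = true :=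
    (PySem.Chars.exists_prefix_drop_iff_isIn sub s).mp ⟨n, h1⟩
  have hnn : 0 ≤ PySem.Chars.find s sub :=
    (PySem.Chars.find_nonneg_iff s sub).mpr ((PySem.Chars.isIn_iff_infix sub s).mp hin)
  obtain ⟨hp, hmin⟩ := PySem.Chars.find_spec hnn
  have : (PySem.Chars.find s sub).toNat = n := by
    rcases lt_trichotomy (PySem.Chars.find s sub).toNat n with h | h | h
    · exact absurd hp (h2 _ h)
    · exact h
    · exact absurd h1 (hmin n h)
  omega

theorem pvFind_of_prefix (s sub : List Char) (h : sub <+: s) : PySem.Chars.find s sub = 0 := by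
  have := pvFind_unique s sub 0 (by simpa) (by intro i hi; omega)
  simpa using this

theorem pvFind_cons (c : Char) (rest sub : List Char) (hnp : ¬ sub <+: (c :: rest)) :
    PySem.Chars.find (c :: rest) sub =
      if PySem.Chars.find rest sub = -1 then -1 else PySem.Chars.find rest sub + 1 := by
  by_cases hr : PySem.Chars.find rest sub = -1
  · simp [hr]
    rw [PySem.Chars.find_eq_neg_one_iff] at hr ⊢
    intro hin
    rcases List.infix_cons_iff.mp hin with h | h
    · exact hnp h
    · exact hr h
  · simp [hr]
    have hnn : 0 ≤ PySem.Chars.find rest sub := by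
      have := PySem.Chars.neg_one_le_find rest sub; omega
    obtain ⟨hp, hmin⟩ := PySem.Chars.find_spec hnn
    have := pvFind_unique (c :: rest) sub ((PySem.Chars.find rest sub).toNat + 1)
      (by simpa using hp)
      (by
        intro i hi
        cases i with
        | zero => simpa using hnp
        | succ i' => simpa using hmin i' (by omega))
    rw [this]; omega

theorem pvModifyHead_id (l : List (List Char)) : List.modifyHead (fun x => x) l = l := by
  cases l <;> simp

theorem pvGo_eq (sep : List Char) (hsep : sep ≠ []) :
    ∀ fuel l cur acc, l.length < fuel →
      PySem.Chars.splitOn.go sep fuel l cur acc =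
        acc.reverse ++ List.modifyHead (cur.reverse ++ ·) (pvChop sep l) := by
  intro fuel
  induction fuel with
  | zero => intro l cur acc h; omega
  | succ f ih =>
    intro l cur acc h
    cases l with
    | nil =>
      rw [PySem.Chars.splitOn.go]
      · rw [pvChop]
        have : PySem.Chars.find [] sep = -1 := by
          rw [PySem.Chars.find_eq_neg_one_iff]
          intro hin
          exact hsep (List.eq_nil_of_infix_nil hin)
        simp [this]
      · omega
    | cons c rest =>
      rw [PySem.Chars.splitOn.go]
      by_cases hp : sep.isPrefixOf (c :: rest) = true
      · simp only [hp, if_pos rfl]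
        have hpre : sep <+: (c :: rest) := List.isPrefixOf_iff_prefix.mp hp
        have hfind : PySem.Chars.find (c :: rest) sep = 0 := pvFind_of_prefix _ _ hpre
        have hlen : 1 ≤ sep.length := List.length_pos_iff.mpr hsep
        rw [ih _ [] (cur.reverse :: acc) (by simp [List.length_drop] at h ⊢; omega)]
        conv_rhs => rw [pvChop]
        have hcond : ¬ (PySem.Chars.find (c :: rest) sep = -1 ∨ sep = []) := by
          simp [hfind, hsep]
        rw [dif_neg hcond]
        simp only [hfind, Int.toNat_zero, List.take_zero,
          List.reverse_cons, List.modifyHead_cons, List.append_assoc, List.reverse_nil,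
          List.nil_append, List.append_nil]
        rw [pvModifyHead_id]
        simp
      · simp only [hp, if_neg hp]
        have hnp : ¬ sep <+: (c :: rest) := fun hh => hp (List.isPrefixOf_iff_prefix.mpr hh)
        have hfc := pvFind_cons c rest sep hnp
        rw [ih rest (c :: cur) acc (by simp at h ⊢; omega)]
        by_cases hr : PySem.Chars.find rest sep = -1
        · have hfc' : PySem.Chars.find (c :: rest) sep = -1 := by rw [hfc]; simp [hr]
          conv_rhs => rw [pvChop, dif_pos (Or.inl hfc')]
          conv_lhs => rw [pvChop, dif_pos (Or.inl hr)]
          simp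
        · have hnn : 0 ≤ PySem.Chars.find rest sep := by
            have := PySem.Chars.neg_one_le_find rest sep; omega
          have hfc' : PySem.Chars.find (c :: rest) sep = PySem.Chars.find rest sep + 1 := by
            rw [hfc]; simp [hr]
          have hcond1 : ¬ (PySem.Chars.find (c :: rest) sep = -1 ∨ sep = []) := by
            rintro (h1 | h2)
            · omega
            · exact hsep h2
          have hcond2 : ¬ (PySem.Chars.find rest sep = -1 ∨ sep = []) := by
            rintro (h1 | h2)
            · exact hr h1
            · exact hsep h2
          conv_rhs => rw [pvChop, dif_neg hcond1]
          conv_lhs => rw [pvChop, dif_neg hcond2]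
          have htn : (PySem.Chars.find rest sep + 1).toNat
              = (PySem.Chars.find rest sep).toNat + 1 := by omega
          simp only [hfc', htn, List.take_succ_cons, List.drop_succ_cons,
            List.modifyHead_cons, List.reverse_cons, List.append_assoc, List.cons_append,
            List.nil_append]
          rw [show (PySem.Chars.find rest sep).toNat + 1 + sep.length
              = ((PySem.Chars.find rest sep).toNat + sep.length) + 1 by omega,
            List.drop_succ_cons]
          simp

theorem pvSplitOn_eq_chop (sep s : List Char) (hsep : sep ≠ []) :
    PySem.Chars.splitOn s sep = pvChop sep s := by
  rw [PySem.Chars.splitOn, pvGo_eq sep hsep (s.length + 1) s [] [] (by omega)]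
  simp only [List.reverse_nil, List.nil_append]
  exact pvModifyHead_id _

theorem pvJoin_nil_cons (a : List Char) (l : List (List Char)) :
    PySem.Chars.join [] (a :: l) = a ++ PySem.Chars.join [] l := by
  cases l with
  | nil => simp [PySem.Chars.join_singleton, PySem.Chars.join_nil]
  | cons b r => rw [PySem.Chars.join_cons_cons]; simp

theorem pvOcc_fits (s sub : List Char) (hnn : 0 ≤ PySem.Chars.find s sub) :
    (PySem.Chars.find s sub).toNat + sub.length ≤ s.length := by
  obtain ⟨hp, -⟩ := PySem.Chars.find_spec hnn
  have := hp.length_le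
  simp [List.length_drop] at this
  have := PySem.Chars.find_le_length s sub
  omega

-- A's replace(mainStr[0:len(subStr)+idx], '', 1) removes exactly that prefix
theorem pvStep (s sub : List Char) (hsub : sub ≠ []) (hnn : 0 ≤ PySem.Chars.find s sub) :
    pvReplace1 s (PySem.List.slice s (some 0) (some ((sub.length : Int) + PySem.Chars.find s sub)))
      = s.drop ((PySem.Chars.find s sub).toNat + sub.length) := by
  have hlen : 1 ≤ sub.length := List.length_pos_iff.mpr hsub
  have hfit := pvOcc_fits s sub hnn
  have hm : PySem.List.slice s (some 0) (some ((sub.length : Int) + PySem.Chars.find s sub))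
      = s.take (sub.length + (PySem.Chars.find s sub).toNat) := by
    rw [PySem.List.slice_zero_start, PySem.List.slice_to s (by omega)]
    congr 1
    omega
  rw [hm, pvReplace1]
  have hpre : s.take (sub.length + (PySem.Chars.find s sub).toNat) <+: s := List.take_prefix _ _
  have hf0 := pvFind_of_prefix s _ hpre
  rw [hf0]
  simp [List.length_take]
  omega

theorem pvALoop_tail (sub : List Char) (hsub : sub ≠ []) :
    ∀ fuel s result count, s.length < fuel → 1 ≤ count →
      pvALoop sub fuel s result count =
        (result ++ PySem.Chars.join [] (pvChop sub s), count + (pvChop sub s).length - 1) := by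
  intro fuel
  induction fuel with
  | zero => intro s result count h _; omega
  | succ f ih =>
    intro s result count h hc
    rw [pvALoop]
    by_cases hneg : PySem.Chars.find s sub = -1
    · have hng : ¬ (PySem.Chars.find s sub > -1) := by omega
      rw [if_neg hng, pvChop, dif_pos (Or.inl hneg), PySem.Chars.join_singleton]
      simp <;> omega
    · have hnn : 0 ≤ PySem.Chars.find s sub := by
        have := PySem.Chars.neg_one_le_find s sub; omega
      have hgt : PySem.Chars.find s sub > -1 := by omega
      have hc0 : ¬ (count = 0) := by omega
      have hlen : 1 ≤ sub.length := List.length_pos_iff.mpr hsub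
      have hfit := pvOcc_fits s sub hnn
      have hslice : PySem.List.slice s (some 0) (some (PySem.Chars.find s sub))
          = s.take (PySem.Chars.find s sub).toNat := by
        rw [PySem.List.slice_zero_start, PySem.List.slice_to s hnn]
      rw [if_pos hgt, if_neg hc0, pvStep s sub hsub hnn,
        ih _ _ _ (by simp [List.length_drop]; omega) (by omega)]
      
      have hcond : ¬ (PySem.Chars.find s sub = -1 ∨ sub = []) := by
        rintro (h1 | h2)
        · exact hneg h1
        · exact hsub h2
      conv_rhs => rw [pvChop, dif_neg hcond]
      rw [pvJoin_nil_cons, hslice]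
      simp <;> omega

theorem pvALoop_head (sub : List Char) (hsub : sub ≠ []) (fuel : Nat) (s : List Char)
    (h : s.length < fuel) :
    pvALoop sub fuel s [] 0 =
      if PySem.Chars.find s sub = -1 then (s, 0)
      else ((pvChop sub s).headD [] ++ sub ++ PySem.Chars.join [] ((pvChop sub s).drop 1),
            (pvChop sub s).length - 1) := by
  cases fuel with
  | zero => omega
  | succ f =>
    rw [pvALoop]
    by_cases hneg : PySem.Chars.find s sub = -1
    · have hng : ¬ (PySem.Chars.find s sub > -1) := by omega
      rw [if_neg hng, if_pos hneg]
      simp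
    · have hnn : 0 ≤ PySem.Chars.find s sub := by
        have := PySem.Chars.neg_one_le_find s sub; omega
      have hgt : PySem.Chars.find s sub > -1 := by omega
      have hlen : 1 ≤ sub.length := List.length_pos_iff.mpr hsub
      have hfit := pvOcc_fits s sub hnn
      have hslice : PySem.List.slice s (some 0) (some (PySem.Chars.find s sub))
          = s.take (PySem.Chars.find s sub).toNat := by
        rw [PySem.List.slice_zero_start, PySem.List.slice_to s hnn]
      rw [if_pos hgt, if_pos rfl, pvStep s sub hsub hnn,
        pvALoop_tail sub hsub f _ _ 1 (by simp [List.length_drop]; omega) (by omega),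
        if_neg hneg]
      have hcond : ¬ (PySem.Chars.find s sub = -1 ∨ sub = []) := by
        rintro (h1 | h2)
        · exact hneg h1
        · exact hsub h2
      conv_rhs => rw [pvChop, dif_neg hcond]
      rw [hslice]
      simp

theorem pvChop_len_pos (sep s : List Char) : 1 ≤ (pvChop sep s).length := by
  rw [pvChop]; split <;> simp

-- ===== VERDICT (by name: the statement is the Claim_ definition above) =====
theorem countLettersInStr_spec : Claim_equal_countLettersInStr := by
  intro subStr str _ hpre
  unfold Spec_countLettersInStr countLettersInStr countLettersInStr_alt
  have hsub : subStr.toList ≠ [] := by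
    intro hnil
    exact hpre (by cases subStr with | _ l => simpa using congrArg String.ofList hnil)
  have hsplit : PySem.Chars.split? str.toList subStr.toList
      = some (pvChop subStr.toList str.toList) := by
    rw [PySem.Chars.split?]
    simp [List.isEmpty_iff, hsub, pvSplitOn_eq_chop _ _ hsub]
  rw [hsplit]
  rw [pvALoop_head subStr.toList hsub (str.toList.length + 1) str.toList (by omega)]
  by_cases hneg : PySem.Chars.find str.toList subStr.toList = -1
  · have hchop : pvChop subStr.toList str.toList = [str.toList] := by
      rw [pvChop, dif_pos (Or.inl hneg)]
    simp [hneg, hchop] <;> omega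
  · have hcond : ¬ (PySem.Chars.find str.toList subStr.toList = -1 ∨ subStr.toList = []) := by
      rintro (h1 | h2)
      · exact hneg h1
      · exact hsub h2
    have hlen2 : 2 ≤ (pvChop subStr.toList str.toList).length := by
      rw [pvChop, dif_neg hcond]
      simp
      exact pvChop_len_pos _ _
    have hne0 : ¬ ((pvChop subStr.toList str.toList).length : Int) - 1 = 0 := by omega
    rw [if_neg hneg]
    simp [hne0] <;> omega
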